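-- pv_equiv track=rewrite | github.com/harshaldulera/ThunderCipher-Writeups | Scripting/scripts/FollowTheRules.py | apply_rule_5
-- ===== SOURCE A (Python) =====
-- from collections import Counter
--
-- def is_vowel(char):
--     return char.lower() in 'aeiou'
--
-- def apply_rule_5(word, shift):
--     if len(word) % 2 == 1:
--         # Shift letters to the right by the extracted shift value
--         og_word = word
--         shift = shift % len(word)
--         word = word[-shift:] + word[:-shift]
--
--         # Replace the last letter with the most frequently used vowel
--         vowels = [char for char in og_word if is_vowel(char)]
--         if vowels:
--             freq_vowels = Counter(vowels)
--             sorted_vowels = sorted(freq_vowels.items(), key=lambda x: (-x[1], og_word.index(x[0])))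
--             most_common_vowel = sorted_vowels[0][0]
--
--             word = word[:-1] + most_common_vowel
--     else:
--         # Replace 't' with 'p' and 'c' with 'z'
--         word = word.replace('t', 'p').replace('T', 'P').replace('c', 'z').replace('C', 'Z')
--
--     return word
-- ===== SOURCE B (Python) =====
-- def apply_rule_5(word, shift):
--     n = len(word)
--     if n % 2 == 1:
--         # rotate right by shift via index arithmetic instead of slicing
--         s = shift % n
--         out = ''.join(word[(i - s) % n] for i in range(n))
--         # most frequent vowel, ties to the earliest-appearing one: scan the word
--         # once, and at each vowel's FIRST occurrence count it by a nested rescan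
--         # (no Counter, no dict, no sort)
--         best = None
--         best_count = 0
--         seen = ''
--         for ch in word:
--             if ch.lower() in 'aeiou' and ch not in seen:
--                 cnt = sum(1 if x == ch else 0 for x in word)
--                 if cnt > best_count:
--                     best, best_count = ch, cnt
--             seen += ch
--         if best is not None:
--             out = out[:-1] + best
--         return out
--     return word.translate(str.maketrans('tTcC', 'pPzZ'))
-- ===== Notes on version B (the rewrite author's own statement) =====
-- stated objective: alternative
-- what changed: Odd branch: the right-rotation is rebuilt character by character with modular index arithmetic instead of two slices, and the most-frequent vowel is found without Counter, dict or sort by a seen-prefix scan that, at each vowel's first occurrence, recounts it with a nested rescan of the word and keeps it only on strict improvement (ties fall to the earliest vowel); even branch uses str.translate with one table instead of four chained replace passes.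
import Mathlib
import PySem

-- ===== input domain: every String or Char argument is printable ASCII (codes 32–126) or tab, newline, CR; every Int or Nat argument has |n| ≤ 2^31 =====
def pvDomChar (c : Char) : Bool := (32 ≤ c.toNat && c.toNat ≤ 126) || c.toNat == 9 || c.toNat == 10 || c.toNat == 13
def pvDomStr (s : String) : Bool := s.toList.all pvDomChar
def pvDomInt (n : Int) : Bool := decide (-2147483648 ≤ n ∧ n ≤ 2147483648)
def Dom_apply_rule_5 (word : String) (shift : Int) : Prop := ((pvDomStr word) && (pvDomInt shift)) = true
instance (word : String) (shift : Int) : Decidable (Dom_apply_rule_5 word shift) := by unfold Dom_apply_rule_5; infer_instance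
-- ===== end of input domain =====

-- B rebuilds the rotation by modular index arithmetic instead of two slices, finds the
-- most frequent vowel by a seen-prefix scan with a nested recount at each vowel's first
-- occurrence (no Counter, no dict, no sort), and does the even-branch substitution with
-- one translate table instead of four chained replace passes; same return value.

-- ===== PORT A =====
-- helper is_vowel: char.lower() in 'aeiou'
def isVowel (c : Char) : Bool :=
  PySem.Chars.isIn (PySem.Chars.lower [c]) ['a', 'e', 'i', 'o', 'u']

def apply_rule_5 (word : String) (shift : Int) : String :=
  let cs := word.toList
  if cs.length % 2 = 1 then
    -- og_word = word; shift = shift % len(word); word = word[-shift:] + word[:-shift]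
    let s : Int := PySem.Int.mod shift (cs.length : Int)
    let w2 := PySem.List.slice cs (some (-s)) none ++ PySem.List.slice cs none (some (-s))
    let vowels := cs.filter isVowel
    if vowels.isEmpty then String.ofList w2
    else
      let freq := PySem.Dict.counter vowels
      -- og_word.index(ch) is exact as Chars.find cs [ch]: every key of freq occurs in og_word
      let sortedV := PySem.List.sorted2 freq.items
        (fun x => -x.2) (fun x => PySem.Chars.find cs [x.1]) false
      match PySem.List.pyGet? sortedV 0 with
      | some p => String.ofList (PySem.List.slice w2 none (some (-1)) ++ [p.1])
      | none => String.ofList w2   -- unreachable (vowels nonempty); IndexError guard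
  else
    -- word.replace('t','p').replace('T','P').replace('c','z').replace('C','Z')
    String.ofList (PySem.Chars.replace (PySem.Chars.replace (PySem.Chars.replace
      (PySem.Chars.replace cs ['t'] ['p']) ['T'] ['P']) ['c'] ['z']) ['C'] ['Z'])

-- ===== PORT B =====
def apply_rule_5_alt (word : String) (shift : Int) : String :=
  let cs := word.toList
  let n := cs.length
  if n % 2 = 1 then
    -- s = shift % n; out = ''.join(word[(i - s) % n] for i in range(n))
    let s : Int := PySem.Int.mod shift (n : Int)
    let out := (PySem.List.pyRange 0 (n : Int) 1).map
      (fun i => PySem.List.pyGetD cs (PySem.Int.mod (i - s) (n : Int)) ' ')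
    -- best/best_count/seen loop over the characters of word
    let st := cs.foldl
      (fun (acc : Option Char × Int × List Char) ch =>
        if PySem.Chars.isIn (PySem.Chars.lower [ch]) ['a', 'e', 'i', 'o', 'u']
            && !(PySem.Chars.isIn [ch] acc.2.2) then
          -- cnt = sum(1 if x == ch else 0 for x in word)
          let cnt := (cs.map (fun x => if x == ch then (1 : Int) else 0)).sum
          if acc.2.1 < cnt then (some ch, cnt, acc.2.2 ++ [ch])
          else (acc.1, acc.2.1, acc.2.2 ++ [ch])
        else (acc.1, acc.2.1, acc.2.2 ++ [ch]))
      ((none : Option Char), (0 : Int), ([] : List Char))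
    match st.1 with
    | some b => String.ofList (PySem.List.slice out none (some (-1)) ++ [b])
    | none => String.ofList out
  else
    -- word.translate(str.maketrans('tTcC', 'pPzZ'))
    String.ofList (cs.map (fun c =>
      (([('t', 'p'), ('T', 'P'), ('c', 'z'), ('C', 'Z')].lookup c).getD c)))

-- ===== PRECONDITION & SPEC =====
def Spec_apply_rule_5 (word : String) (shift : Int) (out : String) : Prop := out = apply_rule_5_alt word shift
instance (word : String) (shift : Int) (out : String) : Decidable (Spec_apply_rule_5 word shift out) := by unfold Spec_apply_rule_5; infer_instance

-- ===== CLAIM (what is proved, stated in full; the proofs are below) =====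
def Claim_equal_apply_rule_5 : Prop := ∀ (word : String) (shift : Int), Dom_apply_rule_5 word shift → Spec_apply_rule_5 word shift (apply_rule_5 word shift)

-- ===== LEMMAS AND PROOFS =====

-- replace with a single-character pattern is a per-character map
theorem replace_go_single (o n : Char) :
    ∀ (l : List Char) (fuel : Nat) (acc : List Char), l.length ≤ fuel →
      PySem.Chars.replace.go [o] [n] fuel l acc =
        acc.reverse ++ l.map (fun c => if c = o then n else c) := by
  intro l
  induction l with
  | nil => intro fuel acc _; cases fuel <;> simp [PySem.Chars.replace.go]
  | cons c t ih =>
    intro fuel acc hf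
    cases fuel with
    | zero => simp at hf
    | succ f =>
      simp only [PySem.Chars.replace.go]
      have hpre : [o].isPrefixOf (c :: t) = (o == c) := by
        simp [List.isPrefixOf]
      rw [hpre]
      simp only [List.length_cons] at hf
      by_cases hco : o = c
      · subst hco
        simp only [beq_self_eq_true, if_true]
        rw [show List.drop ([o] : List Char).length (o :: t) = t from rfl]
        rw [ih f ([n].reverse ++ acc) (by omega)]
        simp
      · have hbe : (o == c) = false := by simp [hco]
        rw [hbe]
        simp only [Bool.false_eq_true, if_false]
        rw [ih f (c :: acc) (by omega)]
        have : c ≠ o := fun h => hco h.symm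
        simp [this]

theorem replace_single (o n : Char) (l : List Char) :
    PySem.Chars.replace l [o] [n] = l.map (fun c => if c = o then n else c) := by
  rw [PySem.Chars.replace]
  simp only [List.isEmpty_cons, if_false, Bool.false_eq_true]
  rw [replace_go_single o n l l.length [] (le_refl _)]
  simp

theorem idxOf_cons_self (c : Char) (t : List Char) : (c :: t).idxOf c = 0 := by
  rw [List.idxOf_cons, beq_self_eq_true]; rfl

theorem idxOf_cons_ne (c a : Char) (t : List Char) (h : c ≠ a) :
    (c :: t).idxOf a = t.idxOf a + 1 := by
  rw [List.idxOf_cons]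
  have : (c == a) = false := by simp [h]
  rw [this]; rfl

-- the position of the first occurrence is idxOf
theorem idxOf_of_first (a : Char) :
    ∀ (l : List Char) (k : Nat), [a] <+: l.drop k → (∀ i < k, ¬ [a] <+: l.drop i) →
      l.idxOf a = k := by
  intro l
  induction l with
  | nil => intro k h _; rw [List.drop_nil] at h; simp [List.prefix_nil] at h
  | cons c t ih =>
    intro k h hmin
    cases k with
    | zero =>
      simp only [List.drop_zero] at h
      rcases h with ⟨r, hr⟩
      simp only [List.singleton_append] at hr
      cases hr
      exact idxOf_cons_self a t
    | succ m =>
      have hne : c ≠ a := by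
        intro hca; subst hca
        exact hmin 0 (by omega) ⟨t, by simp⟩
      rw [idxOf_cons_ne c a t hne]
      rw [ih m (by simpa using h) (fun i hi => by simpa using hmin (i+1) (by omega))]

-- find with a singleton pattern is idxOf
theorem find_singleton (cs : List Char) (a : Char) (ha : a ∈ cs) :
    PySem.Chars.find cs [a] = (cs.idxOf a : Int) := by
  have hin : [a] <:+: cs := by
    obtain ⟨s, t, h⟩ := List.append_of_mem ha
    exact ⟨s, t, by simp [h]⟩
  have hnn : 0 ≤ PySem.Chars.find cs [a] := (PySem.Chars.find_nonneg_iff cs [a]).mpr hin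
  obtain ⟨h1, h2⟩ := PySem.Chars.find_spec hnn
  have := idxOf_of_first a cs (PySem.Chars.find cs [a]).toNat h1 h2
  omega

-- 'ch in seen' for one character is list membership
theorem isIn_single (c : Char) (l : List Char) :
    PySem.Chars.isIn [c] l = l.contains c := by
  by_cases h : c ∈ l
  · have hin : [c] <:+: l := by
      obtain ⟨s, t, ht⟩ := List.append_of_mem h
      exact ⟨s, t, by simp [ht]⟩
    rw [(PySem.Chars.isIn_iff_infix [c] l).mpr hin]
    simp [h]
  · have : ¬ [c] <:+: l := fun hinf => h (hinf.mem (by simp))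
    rw [(PySem.Chars.isIn_eq_false_iff [c] l).mpr this]
    simp [h]

-- first-appearance dedup is strictly increasing in idxOf
theorem pw_ofList (xs : List Char) :
    (PySem.Set.ofList xs).Pairwise (fun a b => xs.idxOf a < xs.idxOf b) := by
  induction xs with
  | nil => simp [PySem.Set.ofList, PySem.Set.empty]
  | cons x t ih =>
    rw [PySem.Set.ofList_cons]
    constructor
    · intro b hb
      rw [PySem.Set.mem_discard] at hb
      obtain ⟨hbs, hbx⟩ := hb
      rw [idxOf_cons_self, idxOf_cons_ne x b t (fun h => hbx h.symm)]
      omega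
    · have hsub : List.Sublist ((PySem.Set.ofList t).discard x) (PySem.Set.ofList t) := by
        rw [PySem.Set.discard]
        exact List.filter_sublist
      refine (ih.sublist hsub).imp_of_mem ?_
      intro a b hma hmb hab
      have hax : a ≠ x := ((PySem.Set.mem_discard _ _ _).mp hma).2
      have hbx : b ≠ x := ((PySem.Set.mem_discard _ _ _).mp hmb).2
      rw [idxOf_cons_ne x a t (fun h => hax h.symm), idxOf_cons_ne x b t (fun h => hbx h.symm)]
      omega

-- relative order of first occurrences survives filtering
theorem idxOf_filter_mono (p : Char → Bool) :
    ∀ (cs : List Char) (a b : Char), a ∈ cs.filter p → b ∈ cs.filter p →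
      (cs.filter p).idxOf a < (cs.filter p).idxOf b → cs.idxOf a < cs.idxOf b := by
  intro cs
  induction cs with
  | nil => intro a b ha; simp at ha
  | cons c t ih =>
    intro a b ha hb hlt
    by_cases hpc : p c
    · rw [List.filter_cons_of_pos hpc] at ha hb hlt
      by_cases hca : c = a
      · subst hca
        rw [idxOf_cons_self]
        have hbc : c ≠ b := by rintro rfl; omega
        rw [idxOf_cons_ne c b t hbc]
        omega
      · have hcb : c ≠ b := by
          rintro rfl
          rw [idxOf_cons_self, idxOf_cons_ne c a _ hca] at hlt
          omega
        rw [idxOf_cons_ne c a _ hca, idxOf_cons_ne c b _ hcb] at hlt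
        have ha' : a ∈ t.filter p := by
          rcases List.mem_cons.mp ha with h | h
          · exact absurd h.symm hca
          · exact h
        have hb' : b ∈ t.filter p := by
          rcases List.mem_cons.mp hb with h | h
          · exact absurd h.symm hcb
          · exact h
        rw [idxOf_cons_ne c a t hca, idxOf_cons_ne c b t hcb]
        have := ih a b ha' hb' (by omega)
        omega
    · rw [List.filter_cons_of_neg hpc] at ha hb hlt
      have hca : c ≠ a := by
        rintro rfl; exact hpc (List.of_mem_filter ha)
      have hcb : c ≠ b := by
        rintro rfl; exact hpc (List.of_mem_filter hb)
      rw [idxOf_cons_ne c a t hca, idxOf_cons_ne c b t hcb]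
      have := ih a b ha hb hlt
      omega

-- A's tuple-key sort is the sort by the lexicographic key
theorem sorted2_eq_sorted_lex {α : Type} (l : List α) (k1 k2 : α → Int) :
    PySem.List.sorted2 l k1 k2 false =
      PySem.List.sorted l (fun x => toLex (k1 x, k2 x)) false := by
  have hfun : (fun (a b : α) => decide (k1 a < k1 b) || (!decide (k1 b < k1 a) && decide (k2 a < k2 b)))
      = fun a b => decide (toLex (k1 a, k2 a) < toLex (k1 b, k2 b)) := by
    funext a b
    have hiff : (toLex (k1 a, k2 a) < toLex (k1 b, k2 b)) ↔
        (k1 a < k1 b ∨ k1 a = k1 b ∧ k2 a < k2 b) := Prod.Lex.lt_iff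
    rw [decide_eq_decide.mpr hiff]
    by_cases h1 : k1 a < k1 b <;> by_cases h2 : k1 b < k1 a <;> by_cases h3 : k2 a < k2 b <;>
      simp [h1, h2, h3] <;> omega
    infer_instance
  rw [PySem.List.sorted_eq_foldl_insertBy, PySem.List.sorted2]
  simp only [Bool.false_eq_true, if_false, ← hfun]

-- the strict-greater fold returns the first maximum
theorem fold_best (k2 : Char × Int → Int) :
    ∀ (l : List (Char × Int)) (b : Char × Int),
      l.Pairwise (fun a c => k2 a < k2 c) → (∀ y ∈ l, k2 b < k2 y) →
      ∃ m, l.foldl (fun acc x => match acc with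
            | none => some x
            | some b => if b.2 < x.2 then some x else acc) (some b) = some m ∧
        (m = b ∨ m ∈ l) ∧ b.2 ≤ m.2 ∧ (b.2 = m.2 → m = b) ∧
        ∀ y ∈ l, y.2 ≤ m.2 ∧ (y.2 = m.2 → y = m ∨ k2 m < k2 y) := by
  intro l
  induction l with
  | nil => intro b _ _; exact ⟨b, rfl, Or.inl rfl, le_refl _, fun _ => rfl, by simp⟩
  | cons x t ih =>
    intro b hpw hb
    rw [List.foldl_cons]
    by_cases hlt : b.2 < x.2
    · simp only [hlt, if_true]
      obtain ⟨m, hm, hmem, hle, heq, hall⟩ :=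
        ih x hpw.of_cons (fun y hy => List.rel_of_pairwise_cons hpw hy)
      refine ⟨m, hm, ?_, by omega, by omega, ?_⟩
      · rcases hmem with h | h
        · exact Or.inr (by simp [h])
        · exact Or.inr (List.mem_cons_of_mem _ h)
      · intro y hy
        rcases List.mem_cons.mp hy with rfl | hyt
        · exact ⟨hle, fun h => Or.inl (heq h).symm⟩
        · exact hall y hyt
    · simp only [hlt, if_false]
      obtain ⟨m, hm, hmem, hle, heq, hall⟩ :=
        ih b hpw.of_cons (fun y hy => hb y (List.mem_cons_of_mem _ hy))
      refine ⟨m, hm, ?_, hle, heq, ?_⟩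
      · rcases hmem with h | h
        · exact Or.inl h
        · exact Or.inr (List.mem_cons_of_mem _ h)
      · intro y hy
        rcases List.mem_cons.mp hy with rfl | hyt
        · constructor
          · omega
          · intro hym
            right
            have hbm : b.2 = m.2 := by omega
            have := heq hbm
            subst this
            exact hb y List.mem_cons_self
        · exact hall y hyt

-- head of A's sort = the strict-greater fold, when the second key is strictly increasing
theorem head_sorted2_eq_best (l : List (Char × Int)) (k2 : Char × Int → Int)
    (hpw : l.Pairwise (fun a b => k2 a < k2 b)) :
    (PySem.List.sorted2 l (fun x => -x.2) k2 false).head? =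
      l.foldl (fun acc x => match acc with
        | none => some x
        | some b => if b.2 < x.2 then some x else acc) none := by
  rw [sorted2_eq_sorted_lex]
  cases l with
  | nil => rfl
  | cons x t =>
    rw [List.foldl_cons]
    show _ = List.foldl _ (some x) t
    obtain ⟨m, hm, hmem, hle, heq, hall⟩ :=
      fold_best k2 t x hpw.of_cons (fun y hy => List.rel_of_pairwise_cons hpw hy)
    rw [hm]
    have hmin : ∀ y ∈ x :: t, y ≠ m →
        (toLex (-(m.2), k2 m) < toLex (-(y.2), k2 y)) := by
      intro y hy hne
      rw [Prod.Lex.lt_iff]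
      rcases List.mem_cons.mp hy with rfl | hyt
      · have : ¬ (y.2 = m.2) ∨ m = y := by
          by_cases h : y.2 = m.2
          · exact Or.inr (heq h)
          · exact Or.inl h
        rcases this with h | h
        · left; simp; omega
        · exact absurd h.symm hne
      · obtain ⟨h1, h2⟩ := hall y hyt
        by_cases h : y.2 = m.2
        · rcases h2 h with rfl | hk
          · exact absurd rfl hne
          · right; constructor
            · simp; omega
            · exact hk
        · left; simp; omega
    have hmem' : m ∈ x :: t := by
      rcases hmem with rfl | h
      · exact List.mem_cons_self
      · exact List.mem_cons_of_mem _ h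
    rcases hsort : PySem.List.sorted (x :: t) (fun y => toLex (-y.2, k2 y)) false with _ | ⟨h0, tt⟩
    · exact absurd ((PySem.List.sorted_eq_nil_iff _ _ _).mp hsort) (by simp)
    · have hhd : h0 ∈ x :: t := by
        rw [← PySem.List.mem_sorted (x :: t) (fun y => toLex (-y.2, k2 y)) false]
        rw [hsort]; exact List.mem_cons_self
      have hle' := PySem.List.key_head_sorted_le (x :: t) (fun y => toLex (-y.2, k2 y)) hsort
      by_cases hhm : h0 = m
      · simp [hhm]
      · have h1 := hmin h0 hhd hhm
        have h2 := hle' m hmem'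
        simp only at h1 h2
        exact absurd (lt_of_lt_of_le h1 h2) (lt_irrefl _)

-- sortedV[0] is the head of the sorted list
theorem pyGet?_zero {α : Type} (xs : List α) : PySem.List.pyGet? xs (0:Int) = xs.head? := by
  simp [PySem.List.pyGet?, PySem.List.pyIdx?]
  cases xs <;> simp

-- the list of characters at which B's branch fires: vowels not yet seen, in order
def nv (pre : List Char) : List Char → List Char
  | [] => []
  | ch :: t => if isVowel ch && !(pre.contains ch) then ch :: nv (pre ++ [ch]) t
               else nv (pre ++ [ch]) t

-- B's seen-state loop is a fold of the strict-greater step over nv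
theorem fold_seen (cs : List Char) :
    ∀ (rest : List Char) (b : Option Char) (c : Int) (pre : List Char),
      rest.foldl
        (fun (acc : Option Char × Int × List Char) ch =>
          if PySem.Chars.isIn (PySem.Chars.lower [ch]) ['a', 'e', 'i', 'o', 'u']
              && !(PySem.Chars.isIn [ch] acc.2.2) then
            let cnt := (cs.map (fun x => if x == ch then (1 : Int) else 0)).sum
            if acc.2.1 < cnt then (some ch, cnt, acc.2.2 ++ [ch])
            else (acc.1, acc.2.1, acc.2.2 ++ [ch])
          else (acc.1, acc.2.1, acc.2.2 ++ [ch]))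
        (b, c, pre) =
      (((nv pre rest).foldl
          (fun (acc : Option Char × Int) ch =>
            if acc.2 < (List.count ch cs : Int) then (some ch, (List.count ch cs : Int)) else acc)
          (b, c)).1,
       ((nv pre rest).foldl
          (fun (acc : Option Char × Int) ch =>
            if acc.2 < (List.count ch cs : Int) then (some ch, (List.count ch cs : Int)) else acc)
          (b, c)).2,
       pre ++ rest) := by
  intro rest
  induction rest with
  | nil => intro b c pre; simp [nv]
  | cons ch t ih =>
    intro b c pre
    have hcnt : (cs.map (fun x => if x == ch then (1 : Int) else 0)).sum
        = (List.count ch cs : Int) := by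
      rw [PySem.List.sum_map_ite_one_zero (fun x => x == ch) cs]
      simp [List.count]
    have hcond : (PySem.Chars.isIn (PySem.Chars.lower [ch]) ['a', 'e', 'i', 'o', 'u']
        && !(PySem.Chars.isIn [ch] pre)) = (isVowel ch && !(pre.contains ch)) := by
      rw [isVowel, isIn_single]
    rw [List.foldl_cons]
    show List.foldl _
      (if (PySem.Chars.isIn (PySem.Chars.lower [ch]) ['a', 'e', 'i', 'o', 'u']
            && !(PySem.Chars.isIn [ch] pre)) = true then
         (if c < (cs.map (fun x => if x == ch then (1 : Int) else 0)).sum then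
            (some ch, (cs.map (fun x => if x == ch then (1 : Int) else 0)).sum, pre ++ [ch])
          else (b, c, pre ++ [ch]))
       else (b, c, pre ++ [ch])) t = _
    rw [hcond, hcnt]
    by_cases hv : (isVowel ch && !(pre.contains ch)) = true
    · rw [if_pos hv]
      have hnv : nv pre (ch :: t) = ch :: nv (pre ++ [ch]) t := by
        rw [nv.eq_def]; simp only [hv, if_true]
      rw [hnv, List.foldl_cons]
      show _ = (((nv (pre ++ [ch]) t).foldl _
          (if c < (List.count ch cs : Int) then (some ch, (List.count ch cs : Int)) else (b, c))).1,
        ((nv (pre ++ [ch]) t).foldl _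
          (if c < (List.count ch cs : Int) then (some ch, (List.count ch cs : Int)) else (b, c))).2,
        pre ++ ch :: t)
      by_cases hlt : c < (List.count ch cs : Int)
      · rw [if_pos hlt, if_pos hlt, ih (some ch) (List.count ch cs : Int) (pre ++ [ch])]
        simp
      · rw [if_neg hlt, if_neg hlt, ih b c (pre ++ [ch])]
        simp
    · rw [if_neg hv]
      have hnv : nv pre (ch :: t) = nv (pre ++ [ch]) t := by
        have hfalse : (isVowel ch && !(pre.contains ch)) = false := by
          simpa using hv
        rw [nv.eq_def]; simp only [hfalse, Bool.false_eq_true, if_false]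
      rw [hnv, ih b c (pre ++ [ch])]
      simp

-- nv from an empty prefix is the first-appearance dedup of the vowels
theorem nv_eq (rest : List Char) :
    ∀ (pre : List Char),
      nv pre rest = (PySem.Set.ofList (rest.filter isVowel)).filter (fun c => !(pre.contains c)) := by
  induction rest with
  | nil => intro pre; simp [nv, PySem.Set.ofList, PySem.Set.empty]
  | cons ch t ih =>
    intro pre
    by_cases hv : isVowel ch
    · rw [List.filter_cons_of_pos hv, PySem.Set.ofList_cons, PySem.Set.discard,
        List.filter_cons]
      by_cases hc : pre.contains ch
      · have hfalse : (isVowel ch && !(pre.contains ch)) = false := by rw [hv, hc]; rfl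
        rw [show nv pre (ch :: t) = nv (pre ++ [ch]) t from by
          rw [nv.eq_def]; simp only [hfalse, Bool.false_eq_true, if_false], ih]
        have hch : (!(pre.contains ch)) = false := by rw [hc]; rfl
        rw [hch]
        simp only [Bool.false_eq_true, if_false]
        rw [List.filter_filter]
        refine List.filter_congr ?_
        intro a _
        by_cases hach : a = ch
        · subst hach; simp
        · simp [hach]
      · have hc' : pre.contains ch = false := by simpa using hc
        have htrue : (isVowel ch && !(pre.contains ch)) = true := by rw [hv, hc']; rfl
        rw [show nv pre (ch :: t) = ch :: nv (pre ++ [ch]) t from by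
          rw [nv.eq_def]; simp only [htrue, if_true], ih]
        have hch : (!(pre.contains ch)) = true := by rw [hc']; rfl
        rw [hch]
        simp only [if_true]
        rw [List.filter_filter]
        congr 1
        refine List.filter_congr ?_
        intro a _
        by_cases hach : a = ch
        · subst hach; simp
        · simp [hach]
    · rw [List.filter_cons_of_neg hv]
      have hv' : isVowel ch = false := by simpa using hv
      have hfalse : (isVowel ch && !(pre.contains ch)) = false := by rw [hv']; rfl
      rw [show nv pre (ch :: t) = nv (pre ++ [ch]) t from by
        rw [nv.eq_def]; simp only [hfalse, Bool.false_eq_true, if_false], ih]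
      refine List.filter_congr ?_
      intro a ha
      have hav : isVowel a := List.of_mem_filter ((PySem.Set.mem_ofList _ _).mp ha)
      have hach : a ≠ ch := fun h => hv (h ▸ hav)
      simp [hach]

-- the pair-shaped strict-greater fold is the Option-shaped one, for positive counts
theorem fold_pair :
    ∀ (l : List (Char × Int)) (a : Option (Char × Int)), (∀ p ∈ l, 0 < p.2) →
      l.foldl (fun (acc : Option Char × Int) p =>
          if acc.2 < p.2 then (some p.1, p.2) else acc)
        (match a with | none => (none, 0) | some b => (some b.1, b.2)) =
      (match l.foldl (fun acc x => match acc with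
          | none => some x
          | some b => if b.2 < x.2 then some x else acc) a with
        | none => ((none : Option Char), (0 : Int)) | some b => (some b.1, b.2)) := by
  intro l
  induction l with
  | nil => intro a _; rfl
  | cons x t ih =>
    intro a hpos
    have hx : 0 < x.2 := hpos x List.mem_cons_self
    have ht : ∀ p ∈ t, 0 < p.2 := fun p hp => hpos p (List.mem_cons_of_mem _ hp)
    rw [List.foldl_cons, List.foldl_cons]
    cases a with
    | none =>
      show t.foldl _ (if (0:Int) < x.2 then (some x.1, x.2) else ((none : Option Char), (0:Int))) = _
      rw [if_pos hx]
      exact ih (some x) ht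
    | some b =>
      show t.foldl _ (if b.2 < x.2 then (some x.1, x.2) else (some b.1, b.2)) = _
      by_cases hlt : b.2 < x.2
      · rw [if_pos hlt]
        have h2 : (match (some b : Option (Char × Int)) with
            | none => some x | some bb => if bb.2 < x.2 then some x else some b) = some x := by
          simp [hlt]
        rw [h2]
        exact ih (some x) ht
      · rw [if_neg hlt]
        have h2 : (match (some b : Option (Char × Int)) with
            | none => some x | some bb => if bb.2 < x.2 then some x else some b) = some b := by
          simp [hlt]
        rw [h2]
        exact ih (some b) ht

-- the rotation built by modular indexing is the two-slice rotation
theorem rot_eq (cs : List Char) (s : Int) (hne : cs ≠ []) (hs0 : 0 ≤ s)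
    (hsn : s < (cs.length : Int)) :
    (PySem.List.pyRange 0 (cs.length : Int) 1).map
        (fun i => PySem.List.pyGetD cs (PySem.Int.mod (i - s) (cs.length : Int)) ' ')
      = PySem.List.slice cs (some (-s)) none ++ PySem.List.slice cs none (some (-s)) := by
  have hn : 0 < cs.length := List.length_pos_of_ne_nil hne
  obtain ⟨k, rfl⟩ : ∃ k : Nat, s = (k : Int) := ⟨s.toNat, (Int.toNat_of_nonneg hs0).symm⟩
  have hk : k < cs.length := by exact_mod_cast hsn
  by_cases hk0 : k = 0
  · subst hk0
    have hr : PySem.List.slice cs (some (-(0:Nat):Int)) none ++ PySem.List.slice cs none (some (-(0:Nat):Int)) = cs := by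
      simp only [Nat.cast_zero, neg_zero]
      rw [show ((0:Int) : Option Int) = some ((0:Nat):Int) from by norm_num]
      simp [pysem]
    rw [hr]
    have hcg : (PySem.List.pyRange 0 (cs.length : Int) 1).map
        (fun i => PySem.List.pyGetD cs (PySem.Int.mod (i - ((0:Nat):Int)) (cs.length : Int)) ' ')
        = (PySem.List.pyRange 0 (cs.length : Int) 1).map (fun j => PySem.List.pyGetD cs j ' ') := by
      refine List.map_congr_left ?_
      intro i hi
      have hmem := PySem.List.mem_pyRange_one.mp hi
      rw [show i - ((0:Nat):Int) = i from by norm_num,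
        PySem.Int.mod_eq_emod_of_pos (by exact_mod_cast hn),
        Int.emod_eq_of_lt hmem.1 hmem.2]
    rw [hcg]
    exact PySem.List.map_pyGetD_pyRange_zero' cs ' '
  · have hkpos : 0 < k := Nat.pos_of_ne_zero hk0
    rw [PySem.List.slice_from_neg_natCast cs k hkpos, PySem.List.slice_to_neg_natCast cs k hkpos]
    rw [← List.rotate_eq_drop_append_take (by omega : cs.length - k ≤ cs.length)]
    apply List.ext_getElem
    · rw [List.length_map, List.length_rotate, PySem.List.length_pyRange_one]; omega
    · intro i h1 h2
      have hi : i < cs.length := by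
        have := PySem.List.length_pyRange_one 0 (cs.length : Int)
        simp [this] at h1
        omega
      rw [List.getElem_map, PySem.List.getElem_pyRange_one 0 (cs.length : Int) i (by
        rw [PySem.List.length_pyRange_one]; omega)]
      rw [List.getElem_rotate cs (cs.length - k) i (by simpa using h2)]
      have hm0 : 0 ≤ PySem.Int.mod ((0 + (i:Int)) - (k:Int)) (cs.length : Int) :=
        PySem.Int.mod_nonneg _ (by exact_mod_cast hn)
      have hm1 : PySem.Int.mod ((0 + (i:Int)) - (k:Int)) (cs.length : Int) < (cs.length : Int) :=
        PySem.Int.mod_lt _ (by exact_mod_cast hn)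
      rw [PySem.List.pyGetD_eq_getElem cs ' ' hm0 (by exact_mod_cast hm1)]
      have hmod : PySem.Int.mod ((0 + (i:Int)) - (k:Int)) (cs.length : Int)
          = (((i + (cs.length - k)) % cs.length : Nat) : Int) := by
        rw [PySem.Int.mod_eq_emod_of_pos (by exact_mod_cast hn)]
        rw [Int.natCast_mod]
        push_cast [Nat.cast_sub (le_of_lt hk)]
        have : (0 + (i:Int)) - (k:Int) = ((i:Int) + ((cs.length:Int) - (k:Int))) - (cs.length:Int) := by ring
        rw [this, Int.sub_emod_right]
      have hidx : (PySem.Int.mod ((0 + (i:Int)) - (k:Int)) (cs.length : Int)).toNat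
          = (i + (cs.length - k)) % cs.length := by omega
      simp only [hidx]

theorem main_eq (word : String) (shift : Int) :
    apply_rule_5 word shift = apply_rule_5_alt word shift := by
  unfold apply_rule_5 apply_rule_5_alt
  set cs := word.toList with hcs
  by_cases hpar : cs.length % 2 = 1
  · simp only [hpar, if_pos]
    set s : Int := PySem.Int.mod shift (cs.length : Int) with hs
    have hne : cs ≠ [] := by
      intro h; rw [h] at hpar; simp at hpar
    have hlen : 0 < cs.length := List.length_pos_of_ne_nil hne
    have hrot := rot_eq cs s hne (PySem.Int.mod_nonneg shift (by exact_mod_cast hlen))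
      (PySem.Int.mod_lt shift (by exact_mod_cast hlen))
    rw [hrot]
    rw [fold_seen cs cs none 0 []]
    rw [show nv [] cs = PySem.Set.ofList (cs.filter isVowel) from by
      rw [nv_eq]; simp]
    set vowels := cs.filter isVowel with hv
    rw [PySem.List.foldl_congr_mem (PySem.Set.ofList vowels)
      (fun (acc : Option Char × Int) ch =>
        if acc.2 < (List.count ch cs : Int) then (some ch, (List.count ch cs : Int)) else acc)
      (fun (acc : Option Char × Int) ch =>
        if acc.2 < (List.count ch vowels : Int) then (some ch, (List.count ch vowels : Int)) else acc)
      (none, 0)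
      (by
        intro acc x hx
        have hvx : isVowel x := List.of_mem_filter ((PySem.Set.mem_ofList _ _).mp hx)
        rw [hv]
        simp only [List.count_filter hvx])]
    have hfm : List.foldl (fun (acc : Option Char × Int) p =>
          if acc.2 < p.2 then (some p.1, p.2) else acc) (none, 0)
          ((PySem.Dict.counter vowels).items)
        = List.foldl (fun (acc : Option Char × Int) ch =>
            if acc.2 < (List.count ch vowels : Int) then (some ch, (List.count ch vowels : Int)) else acc)
          (none, 0) (PySem.Set.ofList vowels) := by
      rw [PySem.Dict.items_counter, List.foldl_map]
    rw [← hfm]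
    have hpos : ∀ p ∈ (PySem.Dict.counter vowels).items, 0 < p.2 := by
      intro p hp
      rw [PySem.Dict.items_counter] at hp
      obtain ⟨k, hk, rfl⟩ := List.mem_map.mp hp
      have hkv : k ∈ vowels := (PySem.Set.mem_ofList _ _).mp hk
      simpa using List.count_pos_iff.mpr hkv
    have hφ : List.foldl (fun (acc : Option Char × Int) p =>
          if acc.2 < p.2 then (some p.1, p.2) else acc) (none, 0)
          ((PySem.Dict.counter vowels).items)
        = (match (PySem.Dict.counter vowels).items.foldl (fun acc x => match acc with
              | none => some x
              | some b => if b.2 < x.2 then some x else acc) none with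
            | none => ((none : Option Char), (0 : Int)) | some b => (some b.1, b.2)) := by
      simpa using fold_pair (PySem.Dict.counter vowels).items none hpos
    rw [hφ]
    have hpw : (PySem.Dict.counter vowels).items.Pairwise
        (fun a b => (fun x : Char × Int => PySem.Chars.find cs [x.1]) a
          < (fun x : Char × Int => PySem.Chars.find cs [x.1]) b) := by
      rw [PySem.Dict.items_counter, List.pairwise_map]
      refine (pw_ofList vowels).imp_of_mem ?_
      intro a b hma hmb hlt
      have ha' : a ∈ vowels := (PySem.Set.mem_ofList vowels a).mp hma
      have hb' : b ∈ vowels := (PySem.Set.mem_ofList vowels b).mp hmb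
      simp only
      rw [find_singleton cs a (List.mem_of_mem_filter ha'),
        find_singleton cs b (List.mem_of_mem_filter hb')]
      exact_mod_cast idxOf_filter_mono isVowel cs a b ha' hb' hlt
    have hhead := head_sorted2_eq_best (PySem.Dict.counter vowels).items
      (fun x => PySem.Chars.find cs [x.1]) hpw
    by_cases hempty : vowels.isEmpty
    · have hvnil : vowels = [] := List.isEmpty_iff.mp hempty
      rw [if_pos hempty, hvnil]
      rfl
    · rw [if_neg hempty]
      rw [pyGet?_zero, hhead]
      cases hM : (PySem.Dict.counter vowels).items.foldl (fun acc x => match acc with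
          | none => some x
          | some b => if b.2 < x.2 then some x else acc) none with
      | none => simp
      | some m => simp
  · simp only [if_neg hpar]
    congr 1
    rw [replace_single, replace_single, replace_single, replace_single]
    simp only [List.map_map]
    refine List.map_congr_left ?_
    intro c _
    simp only [Function.comp_apply]
    by_cases h1 : c = 't'
    · subst h1; decide
    · by_cases h2 : c = 'T'
      · subst h2; decide
      · by_cases h3 : c = 'c'
        · subst h3; decide
        · by_cases h4 : c = 'C'
          · subst h4; decide
          · have e1 : (c == 't') = false := by simpa using h1
            have e2 : (c == 'T') = false := by simpa using h2
            have e3 : (c == 'c') = false := by simpa using h3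
            have e4 : (c == 'C') = false := by simpa using h4
            simp [List.lookup, e1, e2, e3, e4, h1, h2, h3, h4]

-- ===== VERDICT (by name: the statement is the Claim_ definition above) =====
theorem apply_rule_5_spec : Claim_equal_apply_rule_5 := by
  intro word shift _
  unfold Spec_apply_rule_5
  exact main_eq word shift
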